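-- pv_equiv track=rewrite | github.com/haserisa0810-gif/nanami-astro | services/structure_engine.py | _vedic_house_counts
-- ===== SOURCE A (Python) =====
-- from typing import Any, Dict, List, Optional
--
-- def _safe_house_no(pdata: dict[str, Any]) -> int:
--     try:
--         return int(pdata.get("house_no") or 0)
--     except Exception:
--         return 0
--
-- def _vedic_house_counts(planets: dict[str, dict[str, Any]]) -> dict[int, int]:
--     counts: dict[int, int] = {i: 0 for i in range(1, 13)}
--     for pdata in planets.values():
--         if not isinstance(pdata, dict):
--             continue
--         h = _safe_house_no(pdata)
--         if 1 <= h <= 12: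
--             counts[h] += 1
--     return counts
-- ===== SOURCE B (Python) =====
-- from typing import Any, Dict, List, Optional
--
--
-- def _safe_house_no(pdata: dict[str, Any]) -> int:
--     try:
--         return int(pdata.get("house_no") or 0)
--     except Exception:
--         return 0
--
--
-- def _vedic_house_counts(planets: dict[str, dict[str, Any]]) -> dict[int, int]:
--     # Build the fixed 1..12 table directly: one independent counting scan per house.
--     vals = list(planets.values())
--     return {i: sum(1 for pdata in vals
--                    if isinstance(pdata, dict) and _safe_house_no(pdata) == i)
--             for i in range(1, 13)}
-- ===== Notes on version B (the rewrite author's own statement) =====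
-- stated objective: alternative
-- what changed: Replaces the single incremental pass that updates a pre-initialised counts dict in place by a dict comprehension over the fixed houses 1..12, each entry independently counting the planet values whose safe house number equals that house.
import Mathlib
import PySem

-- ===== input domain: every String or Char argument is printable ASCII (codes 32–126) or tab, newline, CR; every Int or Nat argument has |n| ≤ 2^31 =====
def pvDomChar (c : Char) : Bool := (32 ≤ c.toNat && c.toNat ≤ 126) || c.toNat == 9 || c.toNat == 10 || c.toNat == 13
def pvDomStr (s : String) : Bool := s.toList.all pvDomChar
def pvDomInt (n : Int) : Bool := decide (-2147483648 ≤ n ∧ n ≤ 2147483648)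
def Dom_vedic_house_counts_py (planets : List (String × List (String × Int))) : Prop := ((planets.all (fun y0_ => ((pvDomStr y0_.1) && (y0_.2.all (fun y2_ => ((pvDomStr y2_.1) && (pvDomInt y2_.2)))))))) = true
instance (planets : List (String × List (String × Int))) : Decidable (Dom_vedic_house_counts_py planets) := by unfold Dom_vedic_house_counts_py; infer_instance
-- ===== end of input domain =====

-- B replaces A's single incremental counting pass over a pre-initialised dict by a per-house
-- comprehension over the fixed range 1..12, each entry counting the matching values independently
-- (objective: alternative traversal shape, same results).

-- shared helper: _safe_house_no.  Values here are ints, so `pdata.get("house_no") or 0` is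
-- getD with default 0 (`x or 0` is x for x ≠ 0 and 0 for x = 0 or missing), int() is the
-- identity on ints and the except branch never fires.  The inner dict is an assoc list in
-- insertion order; Dict.ofList gives Python's duplicate-key (last wins) semantics.
def safeHouseNo (pdata : List (String × Int)) : Int :=
  (PySem.Dict.ofList pdata).getD "house_no" 0

-- ===== PORT A =====
-- counts = {i: 0 for i in range(1,13)}; one pass over planets.values(); counts[h] += 1.
-- isinstance(pdata, dict) is always true at this type, so the `continue` branch is dead.
def vedic_house_counts_py (planets : List (String × List (String × Int))) : List (Int × Int) :=
  let counts0 : PySem.Dict Int Int :=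
    (PySem.List.pyRange 1 13 1).foldl (fun d i => d.insert i 0) PySem.Dict.empty
  let counts :=
    (PySem.Dict.ofList planets).values.foldl
      (fun d pdata =>
        let h := safeHouseNo pdata
        if 1 ≤ h ∧ h ≤ 12 then d.insert h (d.getD h 0 + 1) else d)
      counts0
  counts.items

-- ===== PORT B =====
-- {i: sum(1 for pdata in vals if isinstance(pdata, dict) and _safe_house_no(pdata) == i)
--  for i in range(1, 13)}  (the isinstance test is always true at this type)
def vedic_house_counts_py_alt (planets : List (String × List (String × Int))) : List (Int × Int) :=
  let vals := (PySem.Dict.ofList planets).values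
  (PySem.List.pyRange 1 13 1).map
    (fun i => (i, ((vals.countP (fun pdata => safeHouseNo pdata == i) : Nat) : Int)))

-- ===== PRECONDITION & SPEC =====
def Spec_vedic_house_counts_py (planets : List (String × List (String × Int))) (out : List (Int × Int)) : Prop := out = vedic_house_counts_py_alt planets
instance (planets : List (String × List (String × Int))) (out : List (Int × Int)) : Decidable (Spec_vedic_house_counts_py planets out) := by unfold Spec_vedic_house_counts_py; infer_instance

-- ===== CLAIM (what is proved, stated in full; the proofs are below) =====
def Claim_equal_vedic_house_counts_py : Prop := ∀ (planets : List (String × List (String × Int))), Dom_vedic_house_counts_py planets → Spec_vedic_house_counts_py planets (vedic_house_counts_py planets)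

-- ===== LEMMAS AND PROOFS =====

def pvL12 : List Int := [1, 2, 3, 4, 5, 6, 7, 8, 9, 10, 11, 12]

lemma pvRange_eq_L12 : PySem.List.pyRange 1 13 1 = pvL12 := by decide

lemma pvMem_L12 {i : Int} (h : i ∈ pvL12) : 1 ≤ i ∧ i ≤ 12 := by
  simp [pvL12] at h
  rcases h with h|h|h|h|h|h|h|h|h|h|h|h <;> omega

lemma pvL12_nodup : pvL12.Nodup := by decide

-- the loop invariant of A's counting pass
lemma pvLoop_items (xs : List (List (String × Int))) (g : Int → Int)
    (d : PySem.Dict Int Int) (hd : d.items = pvL12.map (fun i => (i, g i))) :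
    (xs.foldl
      (fun d pdata =>
        if 1 ≤ safeHouseNo pdata ∧ safeHouseNo pdata ≤ 12 then
          d.insert (safeHouseNo pdata) (d.getD (safeHouseNo pdata) 0 + 1)
        else d)
      d).items
    = pvL12.map (fun i =>
        (i, g i + ((xs.countP (fun pdata => safeHouseNo pdata == i) : Nat) : Int))) := by
  induction xs generalizing g d with
  | nil => simp [hd]
  | cons x xs ih =>
    simp only [List.foldl_cons]
    have hkeys : d.keys = pvL12 := by
      show d.items.map Prod.fst = pvL12
      rw [hd, List.map_map]
      simp [Function.comp_def]
    have hnd : d.keys.Nodup := by rw [hkeys]; exact pvL12_nodup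
    by_cases hr : 1 ≤ safeHouseNo x ∧ safeHouseNo x ≤ 12
    · have hmem : safeHouseNo x ∈ pvL12 := by
        simp only [pvL12, List.mem_cons, List.not_mem_nil, or_false]
        omega
      have hcont : d.contains (safeHouseNo x) = true := by
        rw [PySem.Dict.contains_iff_mem_keys, hkeys]; exact hmem
      have hmemi : (safeHouseNo x, g (safeHouseNo x)) ∈ d.items := by
        rw [hd]; exact List.mem_map_of_mem hmem
      have hgetD : d.getD (safeHouseNo x) 0 = g (safeHouseNo x) :=
        PySem.Dict.getD_of_mem_items d hmemi hnd 0
      have hins : (d.insert (safeHouseNo x) (d.getD (safeHouseNo x) 0 + 1)).items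
          = pvL12.map (fun i => (i, if i = safeHouseNo x then g i + 1 else g i)) := by
        rw [PySem.Dict.items_insert, hcont, if_pos rfl, hd, hgetD, List.map_map]
        apply List.map_congr_left
        intro i _
        by_cases hi : i = safeHouseNo x
        · subst hi; simp
        · simp [hi]
      rw [if_pos hr, ih (fun i => if i = safeHouseNo x then g i + 1 else g i) _ hins]
      apply List.map_congr_left
      intro i _
      by_cases hi : i = safeHouseNo x
      · subst hi
        have hc : (x :: xs).countP (fun p => safeHouseNo p == safeHouseNo x)
            = xs.countP (fun p => safeHouseNo p == safeHouseNo x) + 1 := by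
          simp
        rw [hc, if_pos rfl]
        simp only [Prod.mk.injEq, true_and]
        push_cast
        ring
      · have hne : (safeHouseNo x == i) = false := by
          simp only [beq_eq_false_iff_ne]; exact fun e => hi e.symm
        simp [hne, hi]
    · rw [if_neg hr, ih g d hd]
      apply List.map_congr_left
      intro i hi
      have hib := pvMem_L12 hi
      have hne : (safeHouseNo x == i) = false := by
        simp only [beq_eq_false_iff_ne]
        intro e; exact hr (by rw [e]; exact hib)
      simp [hne]

lemma pvCounts0_items :
    ((PySem.List.pyRange 1 13 1).foldl
        (fun (d : PySem.Dict Int Int) i => d.insert i 0) PySem.Dict.empty).items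
      = pvL12.map (fun i => (i, (0 : Int))) := by decide

-- ===== VERDICT (by name: the statement is the Claim_ definition above) =====
theorem vedic_house_counts_py_spec : Claim_equal_vedic_house_counts_py := by
  intro planets _
  show vedic_house_counts_py planets = vedic_house_counts_py_alt planets
  unfold vedic_house_counts_py vedic_house_counts_py_alt
  simp only []
  rw [pvLoop_items _ (fun _ => 0) _ pvCounts0_items, pvRange_eq_L12]
  simp
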